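-- pv_equiv track=rewrite | github.com/Potato-sAttack/Algo | 채수빈/힙/더 맵게.py | solution
-- ===== SOURCE A (Python) =====
-- import heapq
--
-- def solution(scoville, K):
--     answer = 0
--     heapq.heapify(scoville)
--
--     while True:
--         if len(scoville) > 1 and scoville[0] < K:
--             a = heapq.heappop(scoville)
--             b = heapq.heappop(scoville)
--             heapq.heappush(scoville, a + b * 2)
--             answer += 1
--         elif len(scoville) == 1 and scoville[0] < K:
--             answer = -1
--             break
--         else: break
--
--     return answer
-- ===== SOURCE B (Python) =====
-- def _insert_sorted(v, s):
--     """Return sorted list s with v inserted (linear scan, after equal elements)."""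
--     out = []
--     i = 0
--     while i < len(s) and s[i] <= v:
--         out.append(s[i])
--         i += 1
--     return out + [v] + s[i:]
--
--
-- def solution(scoville, K):
--     # Sorted-list formulation: sort once, always mix the two front elements.
--     # (Return-value equivalent to the heap version; does not mutate scoville.)
--     s = sorted(scoville)
--     answer = 0
--     while len(s) > 1 and s[0] < K:
--         a, b = s[0], s[1]
--         s = _insert_sorted(a + 2 * b, s[2:])
--         answer += 1
--     if len(s) == 1 and s[0] < K:
--         return -1
--     return answer
-- ===== Notes on version B (the rewrite author's own statement) =====
-- stated objective: alternative
-- what changed: Replaces the binary heap with a fully sorted list: sort once, repeatedly mix the two front elements and reinsert the mix at its sorted position; the final singleton check replaces the in-loop -1 branch. Return-value equivalence only: A heapifies scoville in place, B leaves it untouched.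
import Mathlib
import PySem

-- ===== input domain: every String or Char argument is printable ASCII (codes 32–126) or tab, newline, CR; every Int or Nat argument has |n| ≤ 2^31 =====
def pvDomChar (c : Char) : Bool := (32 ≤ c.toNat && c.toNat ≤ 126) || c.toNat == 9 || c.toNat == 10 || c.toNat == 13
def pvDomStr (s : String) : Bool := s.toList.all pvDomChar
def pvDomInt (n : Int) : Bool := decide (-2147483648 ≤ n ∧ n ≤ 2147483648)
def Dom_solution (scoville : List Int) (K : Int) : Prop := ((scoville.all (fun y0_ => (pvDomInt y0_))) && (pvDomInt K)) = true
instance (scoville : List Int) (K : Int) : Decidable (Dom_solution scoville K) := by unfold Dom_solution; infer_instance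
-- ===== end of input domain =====

-- B replaces A's binary heap by a fully sorted list (sort once, mix the two front
-- elements, reinsert at the sorted position); return-value equivalence only: A
-- heapifies scoville in place, B does not mutate it.


-- ===== PORT A =====
-- heapq is ported by its observable specification: after heapify the root scoville[0]
-- is the minimum, heappop removes and returns the minimum, heappush adds its element.
-- Only the returned `answer` is observable and it depends only on the multiset held by
-- the heap, so the port keeps that multiset as a list; exact on all inputs.
def pyHeapRoot (l : List Int) : Int := (l.min?).getD 0

-- the 'while True' loop; fuel = current length (the heap shrinks by one per mix)
def solutionLoop (K : Int) : Nat → List Int → Int → Int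
  | 0, _, answer => answer
  | n + 1, l, answer =>
    if l.length > 1 ∧ pyHeapRoot l < K then
      let a := pyHeapRoot l
      let l1 := l.erase a
      let b := pyHeapRoot l1
      let l2 := l1.erase b
      solutionLoop K n (l2 ++ [a + b * 2]) (answer + 1)
    else if l.length = 1 ∧ pyHeapRoot l < K then -1
    else answer

def solution (scoville : List Int) (K : Int) : Int :=
  solutionLoop K scoville.length scoville 0

-- ===== PORT B =====
-- _insert_sorted: walk past the elements ≤ v, then put v in front of the rest
def insertSorted (v : Int) : List Int → List Int
  | [] => [v]
  | x :: xs => if x ≤ v then x :: insertSorted v xs else v :: x :: xs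

-- the while loop of Source B; fuel = current length, returns (final list, answer)
def altLoop (K : Int) : Nat → List Int → Int → List Int × Int
  | 0, s, answer => (s, answer)
  | n + 1, s, answer =>
    match s with
    | a :: b :: rest =>
      if a < K then altLoop K n (insertSorted (a + 2 * b) rest) (answer + 1)
      else (s, answer)
    | _ => (s, answer)

def solution_alt (scoville : List Int) (K : Int) : Int :=
  let s := PySem.List.sorted scoville (fun x => x) false
  let r := altLoop K s.length s 0
  match r.1 with
  | [x] => if x < K then -1 else r.2
  | _ => r.2

-- ===== PRECONDITION & SPEC =====
def Spec_solution (scoville : List Int) (K : Int) (out : Int) : Prop := out = solution_alt scoville K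
instance (scoville : List Int) (K : Int) (out : Int) : Decidable (Spec_solution scoville K out) := by unfold Spec_solution; infer_instance

-- ===== CLAIM (what is proved, stated in full; the proofs are below) =====
def Claim_equal_solution : Prop := ∀ (scoville : List Int) (K : Int), Dom_solution scoville K → Spec_solution scoville K (solution scoville K)

-- ===== LEMMAS AND PROOFS =====

lemma insertSorted_perm (v : Int) (s : List Int) : (insertSorted v s).Perm (v :: s) := by
  induction s with
  | nil => simp [insertSorted]
  | cons x xs ih =>
    simp only [insertSorted]
    split
    · exact ((ih.cons x).trans (List.Perm.swap v x xs))
    · exact List.Perm.refl _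

lemma insertSorted_length (v : Int) (s : List Int) :
    (insertSorted v s).length = s.length + 1 :=
  (insertSorted_perm v s).length_eq

lemma insertSorted_sorted (v : Int) (s : List Int) (h : s.Pairwise (· ≤ ·)) :
    (insertSorted v s).Pairwise (· ≤ ·) := by
  induction s with
  | nil => simp [insertSorted]
  | cons x xs ih =>
    rcases List.pairwise_cons.mp h with ⟨hx, hxs⟩
    simp only [insertSorted]
    split
    · rename_i hxv
      refine List.pairwise_cons.mpr ⟨?_, ih hxs⟩
      intro y hy
      rcases List.mem_cons.mp (((insertSorted_perm v xs).mem_iff).mp hy) with rfl | h2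
      · exact hxv
      · exact hx y h2
    · rename_i hxv
      exact List.pairwise_cons.mpr
        ⟨by intro y hy
            rcases List.mem_cons.mp hy with rfl | h2
            · exact le_of_not_ge (by exact fun hc => hxv hc)
            · exact le_trans (le_of_not_ge fun hc => hxv hc) (hx y h2), h⟩

-- the heap root of any permutation of a sorted nonempty list is its head
lemma root_of_perm_sorted (l : List Int) (x : Int) (t : List Int)
    (hp : l.Perm (x :: t)) (hs : (x :: t).Pairwise (· ≤ ·)) : pyHeapRoot l = x := by
  have hmin : l.min? = some x := by
    rw [List.min?_eq_some_iff]
    constructor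
    · exact hp.mem_iff.mpr (List.mem_cons_self)
    · intro b hb
      rcases List.mem_cons.mp (hp.mem_iff.mp hb) with rfl | h2
      · exact le_refl _
      · exact (List.pairwise_cons.mp hs).1 b h2
  simp [pyHeapRoot, hmin]

lemma erase_perm_of_perm_cons (l : List Int) (x : Int) (t : List Int)
    (hp : l.Perm (x :: t)) : (l.erase x).Perm t := by
  have := hp.erase x
  simpa [List.erase_cons_head] using this

-- main loop correspondence: A's heap loop on any permutation of B's sorted list
lemma loop_eq (K : Int) : ∀ (n : Nat) (l s : List Int) (ans : Int),
    l.Perm s → s.Pairwise (· ≤ ·) → s.length = n →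
    solutionLoop K n l ans =
      (match (altLoop K n s ans).1 with
       | [x] => if x < K then -1 else (altLoop K n s ans).2
       | _ => (altLoop K n s ans).2) := by
  intro n
  induction n with
  | zero =>
    intro l s ans hp hs hlen
    have hs0 : s = [] := List.length_eq_zero_iff.mp hlen
    subst hs0
    simp [solutionLoop, altLoop]
  | succ n ih =>
    intro l s ans hp hs hlen
    match s, hlen with
    | [x], hlen =>
      have hl : l = [x] := List.perm_singleton.mp hp
      subst hl
      have hn : n = 0 := by simpa using hlen
      subst hn
      have hroot : pyHeapRoot [x] = x := by simp [pyHeapRoot]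
      simp only [solutionLoop, altLoop, hroot]
      by_cases hxK : x < K
      · simp [hxK]
      · simp [hxK]
    | x :: y :: rest, hlen =>
      have hroot : pyHeapRoot l = x := root_of_perm_sorted l x (y :: rest) hp hs
      have hlen2 : l.length = n + 1 := by
        rw [hp.length_eq]; simpa using hlen
      by_cases hxK : x < K
      · -- mix step
        have hlenr : rest.length + 2 = n + 1 := by simpa using hlen
        have hcond : l.length > 1 ∧ pyHeapRoot l < K := by
          refine ⟨by omega, by rw [hroot]; exact hxK⟩
        have htail : (y :: rest).Pairwise (· ≤ ·) := (List.pairwise_cons.mp hs).2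
        have hp1 : (l.erase x).Perm (y :: rest) := erase_perm_of_perm_cons l x (y :: rest) hp
        have hroot1 : pyHeapRoot (l.erase x) = y := root_of_perm_sorted _ y rest hp1 htail
        have hp2 : ((l.erase x).erase y).Perm rest := erase_perm_of_perm_cons _ y rest hp1
        have hpnew : ((l.erase x).erase y ++ [x + 2 * y]).Perm (insertSorted (x + 2 * y) rest) := by
          refine (List.perm_append_singleton _ _).trans ?_
          exact (hp2.cons _).trans (insertSorted_perm _ _).symm
        have hsnew : (insertSorted (x + 2 * y) rest).Pairwise (· ≤ ·) :=
          insertSorted_sorted _ _ (List.pairwise_cons.mp htail).2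
        have hlnew : (insertSorted (x + 2 * y) rest).length = n := by
          rw [insertSorted_length]; omega
        simp only [solutionLoop, altLoop]
        rw [if_pos hcond, if_pos hxK, hroot]
        rw [hroot1]
        rw [show x + y * 2 = x + 2 * y from by ring]
        exact ih _ (insertSorted (x + 2 * y) rest) (ans + 1) hpnew hsnew hlnew
      · -- everything already ≥ K
        have hc1 : ¬ (l.length > 1 ∧ pyHeapRoot l < K) := by
          rw [hroot]; exact fun h => hxK h.2
        have hc2 : ¬ (l.length = 1 ∧ pyHeapRoot l < K) := by
          rw [hroot]; exact fun h => hxK h.2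
        simp only [solutionLoop, altLoop]
        rw [if_neg hc1, if_neg hc2, if_neg hxK]

-- ===== VERDICT (by name: the statement is the Claim_ definition above) =====
theorem solution_spec : Claim_equal_solution := by
  intro scoville K _
  unfold Spec_solution solution solution_alt
  have hperm : scoville.Perm (PySem.List.sorted scoville (fun x => x) false) :=
    (PySem.List.sorted_perm ..).symm
  have hsorted : (PySem.List.sorted scoville (fun x => x) false).Pairwise (· ≤ ·) := by
    have := PySem.List.sorted_pairwise (xs := scoville) (key := fun x => x)
    simpa using this
  have hlen : (PySem.List.sorted scoville (fun x => x) false).length = scoville.length :=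
    hperm.length_eq.symm
  have := loop_eq K scoville.length scoville (PySem.List.sorted scoville (fun x => x) false) 0
    hperm hsorted hlen
  rw [← hlen] at this ⊢
  exact this
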